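-- pv_equiv track=rewrite | github.com/linzhiqiu/continual-learning | faiss_utils.py | aggregate_for_lists
-- ===== SOURCE A (Python) =====
-- def aggregate_for_lists(lists, mapping):
--     """Return a list of selected features indicated by mapping
--         Args:
--             paths (list of features)
--             mapping (indices to select)
--         Returns:
--             total_list (a single list with size (len(mapping)))
--     """
--     total_list = []
--     cur_count = 0
--     for lst in lists:
--         new_count = cur_count + len(lst)
--         cur_mapping = list(filter(lambda x : x < new_count and x >= cur_count, mapping))
--         relative_cur_mapping = [i - cur_count for i in cur_mapping]
--         for i in relative_cur_mapping:
--             total_list.append(lst[i])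
--         cur_count = new_count
--     return total_list
-- ===== SOURCE B (Python) =====
-- def aggregate_for_lists(lists, mapping):
--     """Return a list of selected features indicated by mapping."""
--     # Build once: the flat concatenation and, per global index, which list it came from.
--     flat = []
--     bucket_of = []
--     for b, lst in enumerate(lists):
--         flat.extend(lst)
--         bucket_of.extend([b] * len(lst))
--     # One pass over mapping: route each valid index to its list's bucket.
--     buckets = [[] for _ in lists]
--     for m in mapping:
--         if 0 <= m < len(flat):
--             buckets[bucket_of[m]].append(flat[m])
--     out = []
--     for bk in buckets:
--         out.extend(bk)
--     return out
-- ===== Notes on version B (the rewrite author's own statement) =====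
-- stated objective: faster
-- what changed: Instead of re-scanning the whole mapping once per list (filter per list), B builds the flat concatenation and an index->list table once, routes each mapping index to its list's bucket in a single pass, and concatenates the buckets.
import Mathlib
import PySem

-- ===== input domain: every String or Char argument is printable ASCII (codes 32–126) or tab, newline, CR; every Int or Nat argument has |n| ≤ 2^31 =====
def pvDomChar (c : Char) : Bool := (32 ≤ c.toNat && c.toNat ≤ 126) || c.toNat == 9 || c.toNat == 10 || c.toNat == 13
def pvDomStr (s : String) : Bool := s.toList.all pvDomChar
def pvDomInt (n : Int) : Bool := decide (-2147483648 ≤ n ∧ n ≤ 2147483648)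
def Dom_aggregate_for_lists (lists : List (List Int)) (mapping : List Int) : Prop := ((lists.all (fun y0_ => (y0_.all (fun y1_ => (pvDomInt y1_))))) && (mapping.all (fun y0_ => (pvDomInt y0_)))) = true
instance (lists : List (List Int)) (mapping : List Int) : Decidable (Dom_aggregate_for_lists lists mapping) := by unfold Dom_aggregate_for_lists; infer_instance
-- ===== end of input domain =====

-- B replaces A's per-list re-scan of the whole mapping by a flat concatenation plus an
-- index→list table built once and a single routing pass over mapping (one bucket per list).

-- ===== PORT A =====
-- the for-loop over `lists`, threading (total_list, cur_count)
def pvAggLoop (mapping : List Int) : List (List Int) → List Int → Int → List Int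
  | [], total, _ => total
  | lst :: rest, total, cur =>
    let newCount := cur + (lst.length : Int)
    let curMapping := mapping.filter (fun x => decide (x < newCount) && decide (cur ≤ x))
    let relativeCurMapping := curMapping.map (fun i => i - cur)
    -- lst[i]: the filter guarantees 0 ≤ i < len(lst), so Python's lst[i] is exactly this
    pvAggLoop mapping rest (total ++ relativeCurMapping.map (fun i => (lst[i.toNat]?).getD 0)) newCount

def aggregate_for_lists (lists : List (List Int)) (mapping : List Int) : List Int :=
  pvAggLoop mapping lists [] 0

-- ===== PORT B =====
-- first loop of Source B: flat (the concatenation) and bucket_of (global index → list number)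
def pvBuild : List (List Int) → Nat → List Int × List Nat
  | [], _ => ([], [])
  | lst :: rest, b =>
    let fb := pvBuild rest (b + 1)
    (lst ++ fb.1, List.replicate lst.length b ++ fb.2)

-- second loop of Source B: route each valid mapping index into its list's bucket
def pvFill (flat : List Int) (bo : List Nat) : List Int → List (List Int) → List (List Int)
  | [], buckets => buckets
  | m :: ms, buckets =>
    let buckets' :=
      if 0 ≤ m ∧ m < (flat.length : Int) then
        -- flat[m], bucket_of[m]: the guard guarantees 0 ≤ m < len(flat) = len(bucket_of)
        buckets.modify ((bo[m.toNat]?).getD 0) (fun bk => bk ++ [(flat[m.toNat]?).getD 0])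
      else buckets
    pvFill flat bo ms buckets'

def aggregate_for_lists_alt (lists : List (List Int)) (mapping : List Int) : List Int :=
  let fb := pvBuild lists 0
  let buckets := pvFill fb.1 fb.2 mapping (List.replicate lists.length [])
  buckets.foldl (· ++ ·) []

-- ===== PRECONDITION & SPEC =====
def Spec_aggregate_for_lists (lists : List (List Int)) (mapping : List Int) (out : List Int) : Prop := out = aggregate_for_lists_alt lists mapping
instance (lists : List (List Int)) (mapping : List Int) (out : List Int) : Decidable (Spec_aggregate_for_lists lists mapping out) := by unfold Spec_aggregate_for_lists; infer_instance

-- ===== CLAIM (what is proved, stated in full; the proofs are below) =====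
def Claim_equal_aggregate_for_lists : Prop := ∀ (lists : List (List Int)) (mapping : List Int), Dom_aggregate_for_lists lists mapping → Spec_aggregate_for_lists lists mapping (aggregate_for_lists lists mapping)

-- ===== LEMMAS AND PROOFS =====

-- per-list contributions of A, as a list of blocks (one block per input list)
def pvGroups (mapping : List Int) : List (List Int) → Int → List (List Int)
  | [], _ => []
  | lst :: rest, cur =>
    ((mapping.filter (fun x => decide (x < cur + (lst.length : Int)) && decide (cur ≤ x))).map
      (fun i => (lst[(i - cur).toNat]?).getD 0)) :: pvGroups mapping rest (cur + (lst.length : Int))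

-- offset of list number b (sum of the lengths before it)
def pvOff : List (List Int) → Nat → Int
  | _, 0 => 0
  | [], _ + 1 => 0
  | lst :: rest, b + 1 => (lst.length : Int) + pvOff rest b

lemma pvAggLoop_eq (mapping : List Int) (l : List (List Int)) (total : List Int) (cur : Int) :
    pvAggLoop mapping l total cur = total ++ (pvGroups mapping l cur).flatten := by
  induction l generalizing total cur with
  | nil => simp [pvAggLoop, pvGroups]
  | cons lst rest ih =>
    simp only [pvAggLoop, pvGroups, ih, List.flatten_cons, List.map_map, List.append_assoc]
    rfl

lemma pvFoldlAppend (l : List (List Int)) (acc : List Int) :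
    l.foldl (· ++ ·) acc = acc ++ l.flatten := by
  induction l generalizing acc with
  | nil => simp
  | cons x xs ih => simp [List.foldl_cons, ih]

lemma pvFill_get (flat : List Int) (bo : List Nat) (ms : List Int)
    (buckets : List (List Int)) (b : Nat) :
    (pvFill flat bo ms buckets)[b]? =
      buckets[b]?.map (· ++ (ms.filter (fun m => decide (0 ≤ m) && decide (m < (flat.length : Int))
        && ((bo[m.toNat]?).getD 0 == b))).map (fun m => (flat[m.toNat]?).getD 0)) := by
  induction ms generalizing buckets with
  | nil =>
    simp [pvFill]
  | cons m ms ih =>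
    simp only [pvFill]
    rw [ih]
    by_cases hg : 0 ≤ m ∧ m < (flat.length : Int)
    · rw [if_pos hg]
      rw [List.getElem?_modify]
      by_cases hib : (bo[m.toNat]?).getD 0 = b
      · cases hbk : buckets[b]? <;>
          simp [List.filter_cons, hg.1, hg.2, hib, List.append_assoc]
      · cases hbk : buckets[b]? <;>
          simp [List.filter_cons, hg.1, hg.2, hib]
    · have h1 : (decide (0 ≤ m) && decide (m < (flat.length : Int))
          && ((bo[m.toNat]?).getD 0 == b)) = false := by
        rw [not_and_or] at hg
        rcases hg with h | h <;> simp [h]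
      rw [if_neg hg]
      simp only [List.filter_cons, h1]
      simp

lemma pvBuild_fst (l : List (List Int)) (c : Nat) : (pvBuild l c).1 = l.flatten := by
  induction l generalizing c with
  | nil => simp [pvBuild]
  | cons x xs ih => simp [pvBuild, ih]

lemma pvBuild_snd_shift (l : List (List Int)) (c : Nat) :
    (pvBuild l (c + 1)).2 = (pvBuild l c).2.map (· + 1) := by
  induction l generalizing c with
  | nil => simp [pvBuild]
  | cons x xs ih => simp [pvBuild, ih, List.map_replicate]

lemma pvBuild_snd_ge (l : List (List Int)) (c : Nat) : ∀ x ∈ (pvBuild l c).2, c ≤ x := by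
  induction l generalizing c with
  | nil => simp [pvBuild]
  | cons y ys ih =>
    intro x hx
    simp only [pvBuild, List.mem_append, List.mem_replicate] at hx
    rcases hx with ⟨_, rfl⟩ | hx
    · exact le_refl _
    · exact Nat.le_of_succ_le (ih (c + 1) x hx)

lemma pvBuild_len (l : List (List Int)) (c : Nat) :
    (pvBuild l c).2.length = (pvBuild l c).1.length := by
  induction l generalizing c with
  | nil => simp [pvBuild]
  | cons x xs ih => simp [pvBuild, ih]

lemma pvOff_nonneg (l : List (List Int)) (b : Nat) : 0 ≤ pvOff l b := by
  induction l generalizing b with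
  | nil => cases b <;> simp [pvOff]
  | cons x xs ih =>
    cases b with
    | zero => simp [pvOff]
    | succ b => simp only [pvOff]; have := ih b; positivity

lemma pvKey (lists : List (List Int)) (b : Nat) (hb : b < lists.length) (m : Int) :
    (((0 ≤ m ∧ m < ((pvBuild lists 0).1.length : Int)) ∧ ((pvBuild lists 0).2[m.toNat]?).getD 0 = b)
      ↔ (pvOff lists b ≤ m ∧ m < pvOff lists b + ((lists[b]?.getD []).length : Int)))
    ∧ (pvOff lists b ≤ m → m < pvOff lists b + ((lists[b]?.getD []).length : Int) →
       ((pvBuild lists 0).1[m.toNat]?).getD 0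
         = ((lists[b]?.getD [])[(m - pvOff lists b).toNat]?).getD 0) := by
  induction lists generalizing b m with
  | nil => simp at hb
  | cons lst rest ih =>
    have hflat : (pvBuild rest 1).1 = (pvBuild rest 0).1 := by
      rw [pvBuild_fst, pvBuild_fst]
    have hlen2 : (pvBuild rest 1).2.length = (pvBuild rest 0).1.length := by
      rw [pvBuild_snd_shift]; simp [pvBuild_len]
    cases b with
    | zero =>
      simp only [pvOff, List.getElem?_cons_zero, Option.getD_some, pvBuild, zero_add]
      constructor
      · constructor
        · rintro ⟨⟨h0, hm⟩, hidx⟩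
          refine ⟨h0, ?_⟩
          by_contra hge
          push_neg at hge
          have hge' : lst.length ≤ m.toNat := by omega
          have hre : ((List.replicate lst.length (0:Nat)) ++ (pvBuild rest 1).2)[m.toNat]? = (pvBuild rest 1).2[m.toNat - lst.length]? := by
            rw [List.getElem?_append_right (l₁ := List.replicate lst.length _) (by simpa using hge')]
            simp
          rw [hre] at hidx
          have hlt : m.toNat - lst.length < (pvBuild rest 1).2.length := by
            simp only [List.length_append, hflat] at hm
            rw [hlen2]
            push_cast at hm
            omega
          rw [List.getElem?_eq_getElem hlt] at hidx
          have hmem : (pvBuild rest 1).2[m.toNat - lst.length]'hlt ∈ (pvBuild rest 1).2 := List.getElem_mem hlt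
          have := pvBuild_snd_ge rest 1 _ hmem
          simp at hidx
          omega
        · rintro ⟨h0, hm⟩
          have hmn : m.toNat < lst.length := by omega
          have htot : m < ((lst ++ (pvBuild rest 1).1).length : Int) := by
            simp only [List.length_append]; push_cast; omega
          refine ⟨⟨h0, htot⟩, ?_⟩
          rw [List.getElem?_append_left (l₁ := List.replicate lst.length _) (by simpa using hmn), List.getElem?_replicate]
          simp [hmn]
      · intro h0 hm
        have hmn : m.toNat < lst.length := by omega
        rw [List.getElem?_append_left hmn]
        simp
    | succ b =>
      have hb' : b < rest.length := by simpa using hb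
      have IH := ih b hb' (m - (lst.length : Int))
      simp only [pvOff, List.getElem?_cons_succ, pvBuild]
      have hcast : ∀ (hge : (lst.length : Int) ≤ m), m.toNat - lst.length = (m - (lst.length : Int)).toNat := by
        intro hge; omega
      constructor
      · constructor
        · rintro ⟨⟨h0, hm⟩, hidx⟩
          -- m must be past lst
          have hge : (lst.length : Int) ≤ m := by
            by_contra hlt
            push_neg at hlt
            have hmn : m.toNat < lst.length := by omega
            rw [List.getElem?_append_left (l₁ := List.replicate lst.length _) (by simpa using hmn), List.getElem?_replicate] at hidx
            simp [hmn] at hidx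
          have hge' : lst.length ≤ m.toNat := by omega
          have hre : ((List.replicate lst.length (0:Nat)) ++ (pvBuild rest (0+1)).2)[m.toNat]? = (pvBuild rest (0+1)).2[m.toNat - lst.length]? := by
            rw [List.getElem?_append_right (l₁ := List.replicate lst.length _) (by simpa using hge')]
            simp
          rw [hre, pvBuild_snd_shift, List.getElem?_map] at hidx
          have hlt : m.toNat - lst.length < (pvBuild rest 0).2.length := by
            simp only [List.length_append, hflat] at hm
            rw [pvBuild_len]
            push_cast at hm
            omega
          rw [List.getElem?_eq_getElem hlt] at hidx
          simp only [Option.map_some, Option.getD_some] at hidx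
          have hidx0 : (pvBuild rest 0).2[m.toNat - lst.length] = b := by omega
          have hpre : ((0 ≤ m - (lst.length:Int) ∧ m - (lst.length:Int) < ((pvBuild rest 0).1.length : Int)) ∧ ((pvBuild rest 0).2[(m - (lst.length:Int)).toNat]?).getD 0 = b) := by
            refine ⟨⟨by omega, ?_⟩, ?_⟩
            · simp only [List.length_append] at hm; push_cast at hm ⊢
              rw [← pvBuild_len] at hm ⊢
              rw [pvBuild_snd_shift] at hm
              simp at hm
              omega
            · rw [← hcast hge, List.getElem?_eq_getElem hlt]
              simpa using hidx0
          have := IH.1.mp hpre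
          omega
        · rintro ⟨h1, h2⟩
          have hoffn := pvOff_nonneg rest b
          have hge : (lst.length : Int) ≤ m := by omega
          have hpre := IH.1.mpr ⟨by omega, by omega⟩
          obtain ⟨⟨h0', hm'⟩, hidx'⟩ := hpre
          refine ⟨⟨by omega, ?_⟩, ?_⟩
          · simp only [List.length_append]
            push_cast
            rw [hflat] at *
            omega
          · have hge' : lst.length ≤ m.toNat := by omega
            have hre : ((List.replicate lst.length (0:Nat)) ++ (pvBuild rest (0+1)).2)[m.toNat]? = (pvBuild rest (0+1)).2[m.toNat - lst.length]? := by
              rw [List.getElem?_append_right (l₁ := List.replicate lst.length _) (by simpa using hge')]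
              simp
            rw [hre, pvBuild_snd_shift, List.getElem?_map, hcast hge]
            cases hx : (pvBuild rest 0).2[(m - (lst.length:Int)).toNat]? with
            | none =>
              exfalso
              have := List.getElem?_eq_none_iff.mp hx
              rw [pvBuild_len] at this
              omega
            | some y =>
              rw [hx] at hidx'
              simp at hidx'
              simp [hidx']
      · intro h1 h2
        have hoffn := pvOff_nonneg rest b
        have hge : (lst.length : Int) ≤ m := by omega
        have hge' : lst.length ≤ m.toNat := by omega
        rw [List.getElem?_append_right (l₁ := lst) hge', hflat, hcast hge]
        have := IH.2 (by omega) (by omega)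
        rw [this]
        congr 2
        omega

lemma pvGroups_len (mapping : List Int) (l : List (List Int)) (cur : Int) :
    (pvGroups mapping l cur).length = l.length := by
  induction l generalizing cur with
  | nil => rfl
  | cons x xs ih => simp [pvGroups, ih]

lemma pvGroups_get (mapping : List Int) (l : List (List Int)) (cur : Int) (b : Nat)
    (hb : b < l.length) :
    (pvGroups mapping l cur)[b]?.getD [] =
      (mapping.filter (fun x => decide (x < cur + pvOff l b + ((l[b]?.getD []).length : Int))
        && decide (cur + pvOff l b ≤ x))).map
        (fun i => ((l[b]?.getD [])[(i - (cur + pvOff l b)).toNat]?).getD 0) := by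
  induction l generalizing cur b with
  | nil => simp at hb
  | cons lst rest ih =>
    cases b with
    | zero => simp [pvGroups, pvOff]
    | succ b =>
      have hb' : b < rest.length := by simpa using hb
      simp only [pvGroups, List.getElem?_cons_succ]
      rw [ih (cur + (lst.length : Int)) b hb']
      simp only [pvOff, add_assoc]
      rfl

lemma pvFill_eq_groups (lists : List (List Int)) (mapping : List Int) :
    pvFill (pvBuild lists 0).1 (pvBuild lists 0).2 mapping (List.replicate lists.length []) =
      pvGroups mapping lists 0 := by
  apply List.ext_getElem?
  intro i
  rw [pvFill_get]
  by_cases hi : i < lists.length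
  · rw [List.getElem?_replicate, if_pos hi]
    have hlen : i < (pvGroups mapping lists 0).length := by rw [pvGroups_len]; exact hi
    have hg : (pvGroups mapping lists 0)[i]? = some ((pvGroups mapping lists 0)[i]?.getD []) := by
      rw [List.getElem?_eq_getElem hlen]
      rfl
    rw [hg, pvGroups_get mapping lists 0 i hi]
    simp only [Option.map_some, List.nil_append, zero_add]
    congr 1
    have hfil : mapping.filter (fun m => decide (0 ≤ m) && decide (m < ((pvBuild lists 0).1.length : Int))
          && (((pvBuild lists 0).2[m.toNat]?).getD 0 == i)) =
        mapping.filter (fun x => decide (x < pvOff lists i + ((lists[i]?.getD []).length : Int))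
          && decide (pvOff lists i ≤ x)) := by
      apply List.filter_congr
      intro m _
      have hiff := (pvKey lists i hi m).1
      have lhs_iff : ((decide (0 ≤ m) && decide (m < ((pvBuild lists 0).1.length : Int))
          && (((pvBuild lists 0).2[m.toNat]?).getD 0 == i)) = true)
          ↔ ((0 ≤ m ∧ m < ((pvBuild lists 0).1.length : Int)) ∧ ((pvBuild lists 0).2[m.toNat]?).getD 0 = i) := by
        simp [and_assoc]
      have rhs_iff : ((decide (m < pvOff lists i + ((lists[i]?.getD []).length : Int))
          && decide (pvOff lists i ≤ m)) = true)
          ↔ (pvOff lists i ≤ m ∧ m < pvOff lists i + ((lists[i]?.getD []).length : Int)) := by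
        simp [and_comm]
      have hbe : ∀ (x y : Bool), (x = true ↔ y = true) → x = y := by decide
      exact hbe _ _ (by rw [lhs_iff, rhs_iff]; exact hiff)
    rw [hfil]
    apply List.map_congr_left
    intro m hm
    obtain ⟨_, hp⟩ := List.mem_filter.mp hm
    simp only [Bool.and_eq_true, decide_eq_true_eq] at hp
    exact (pvKey lists i hi m).2 hp.2 hp.1
  · rw [List.getElem?_replicate, if_neg hi]
    rw [List.getElem?_eq_none (by rw [pvGroups_len]; omega)]
    simp

-- ===== VERDICT (by name: the statement is the Claim_ definition above) =====
theorem aggregate_for_lists_spec : Claim_equal_aggregate_for_lists := by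
  intro lists mapping _
  unfold Spec_aggregate_for_lists aggregate_for_lists aggregate_for_lists_alt
  rw [pvAggLoop_eq, pvFoldlAppend, pvFill_eq_groups]
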